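-- pv_equiv track=rewrite | github.com/nicolasGomez2000/archivosProg2 | practica5.py | sumaTiempo
-- ===== SOURCE A (Python) =====
-- def sumaTiempo(t):
--     at = 0
--     mt = 0
--     dt = 0
--     for (d,m,a) in t:
--         at += a
--         mt += m
--         dt += d
--
--     return (dt%30,mt%12,at)
-- ===== SOURCE B (Python) =====
-- def sumaTiempo(t):
--     # divide-and-conquer: componentwise-add the two halves' totals recursively
--     def total(lo, hi):
--         if lo == hi:
--             return (0, 0, 0)
--         if hi - lo == 1:
--             return t[lo]
--         mid = (lo + hi) // 2
--         d1, m1, a1 = total(lo, mid)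
--         d2, m2, a2 = total(mid, hi)
--         return (d1 + d2, m1 + m2, a1 + a2)
--     d, m, a = total(0, len(t))
--     return (d % 30, m % 12, a)
-- ===== Notes on version B (the rewrite author's own statement) =====
-- stated objective: alternative
-- what changed: Replaces the single accumulating loop with a divide-and-conquer reduction: the list is split in halves recursively and the halves' component totals are added pairwise, with the 30/12 reductions applied once at the end.
import Mathlib
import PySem

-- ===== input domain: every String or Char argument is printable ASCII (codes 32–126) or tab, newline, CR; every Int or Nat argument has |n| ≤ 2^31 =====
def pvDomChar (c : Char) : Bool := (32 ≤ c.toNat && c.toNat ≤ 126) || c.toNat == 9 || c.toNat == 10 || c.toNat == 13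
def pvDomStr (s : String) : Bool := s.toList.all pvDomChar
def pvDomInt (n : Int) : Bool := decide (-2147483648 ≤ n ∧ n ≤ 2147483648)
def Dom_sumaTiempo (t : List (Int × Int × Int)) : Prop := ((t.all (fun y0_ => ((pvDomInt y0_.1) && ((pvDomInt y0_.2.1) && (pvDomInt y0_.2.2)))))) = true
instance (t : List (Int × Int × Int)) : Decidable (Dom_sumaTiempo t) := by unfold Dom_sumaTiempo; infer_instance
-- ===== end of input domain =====

-- B replaces A's single accumulating loop by a divide-and-conquer pairwise reduction of the halves' totals (alternative decomposition, same O(n) cost).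
-- ===== PORT A =====
-- literal port of A: one fold carrying the three accumulators (at, mt, dt)
def sumaTiempo (t : List (Int × Int × Int)) : Int × Int × Int :=
  let acc := t.foldl (fun (s : Int × Int × Int) (x : Int × Int × Int) =>
    (s.1 + x.2.2, s.2.1 + x.2.1, s.2.2 + x.1)) (0, 0, 0)
  (PySem.Int.mod acc.2.2 30, PySem.Int.mod acc.2.1 12, acc.1)

-- ===== PORT B =====
-- port of B: divide-and-conquer pairwise reduction (total lo hi over indices becomes
-- recursion on the sublist: split at mid = length/2, combine the halves componentwise)
def sumaTotal : List (Int × Int × Int) → Int × Int × Int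
  | [] => (0, 0, 0)
  | [x] => x
  | a :: b :: rest =>
      let mid := (a :: b :: rest).length / 2
      let s1 := sumaTotal ((a :: b :: rest).take mid)
      let s2 := sumaTotal ((a :: b :: rest).drop mid)
      (s1.1 + s2.1, s1.2.1 + s2.2.1, s1.2.2 + s2.2.2)
  termination_by l => l.length
  decreasing_by
    · simp [List.length_take]; omega
    · simp [List.length_drop]; omega

def sumaTiempo_alt (t : List (Int × Int × Int)) : Int × Int × Int :=
  let s := sumaTotal t
  (PySem.Int.mod s.1 30, PySem.Int.mod s.2.1 12, s.2.2)

-- ===== PRECONDITION & SPEC =====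
def Spec_sumaTiempo (t : List (Int × Int × Int)) (out : Int × Int × Int) : Prop := out = sumaTiempo_alt t
instance (t : List (Int × Int × Int)) (out : Int × Int × Int) : Decidable (Spec_sumaTiempo t out) := by unfold Spec_sumaTiempo; infer_instance

-- ===== CLAIM (what is proved, stated in full; the proofs are below) =====
def Claim_equal_sumaTiempo : Prop := ∀ (t : List (Int × Int × Int)), Dom_sumaTiempo t → Spec_sumaTiempo t (sumaTiempo t)

-- ===== LEMMAS AND PROOFS =====

-- ===== VERDICT (by name: the statement is the Claim_ definition above) =====
lemma suma_fold (t : List (Int × Int × Int)) (a m d : Int) :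
    t.foldl (fun (s : Int × Int × Int) (x : Int × Int × Int) =>
      (s.1 + x.2.2, s.2.1 + x.2.1, s.2.2 + x.1)) (a, m, d)
    = (a + (t.map (fun x => x.2.2)).sum,
       m + (t.map (fun x => x.2.1)).sum,
       d + (t.map (fun x => x.1)).sum) := by
  induction t generalizing a m d with
  | nil => simp
  | cons h tl ih => simp [List.foldl, ih]; refine ⟨by ring, by ring, by ring⟩

lemma sumaTotal_eq (t : List (Int × Int × Int)) :
    sumaTotal t = ((t.map (fun x => x.1)).sum,
                   (t.map (fun x => x.2.1)).sum,
                   (t.map (fun x => x.2.2)).sum) := by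
  fun_induction sumaTotal t with
  | case1 => simp
  | case2 x => simp
  | case3 a b l mid s1 s2 ih1 ih2 =>
      simp only [s1, s2, ih1, ih2]
      have h : ∀ (f : (Int × Int × Int) → Int),
          (((a :: b :: l).take ((a :: b :: l).length / 2)).map f).sum
          + (((a :: b :: l).drop ((a :: b :: l).length / 2)).map f).sum
          = ((a :: b :: l).map f).sum := by
        intro f
        rw [← List.sum_append, ← List.map_append, List.take_append_drop]
      exact Prod.ext (h _) (Prod.ext (h _) (h _))

theorem sumaTiempo_spec : Claim_equal_sumaTiempo := by
  intro t _
  unfold Spec_sumaTiempo sumaTiempo sumaTiempo_alt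
  simp [suma_fold, sumaTotal_eq]
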